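-- pv_equiv track=rewrite | github.com/pritamchandra/Foobar | 3.1.py | solution
-- ===== SOURCE A (Python) =====
-- def solution(start, length):
--
--     # calculate the XOR in the range [1, n] and observe that the value has period 4
--     def xortill(n):
--         if n % 4 == 1: return 1
--         elif n % 4 == 2: return (n + 1)
--         elif n % 4 == 3: return 0
--         else: return n
--
--     answer = 0
--
--     for j in range(length):
--         # XOR[x, y] = XOR[1, x - 1] ^ XOR[1, y]
--         # Calculate the boundaries for each line
--         a = xortill( start + (j * length) - 1 )
--         b = xortill( start + ((j + 1) * length) - (j + 1) )
--         answer = answer ^ (a ^ b)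
--
--     return answer
-- ===== SOURCE B (Python) =====
-- def solution(start, length):
--     # XOR of the kept staircase = XOR of the full length x length rectangle,
--     # cancelled against the XOR of the removed tails of each row.
--     def xortill(n):
--         r = n % 4
--         if r == 0: return n
--         if r == 1: return 1
--         if r == 2: return n + 1
--         return 0
--
--     if length <= 0:
--         return 0
--
--     full = xortill(start + length * length - 1) ^ xortill(start - 1)
--     tails = 0
--     for j in range(length):
--         top = start + (j + 1) * length - 1          # last element of full row j
--         kept = start + (j + 1) * length - (j + 1)   # last kept element of row j
--         tails ^= xortill(top) ^ xortill(kept)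
--     return full ^ tails
-- ===== Notes on version B (the rewrite author's own statement) =====
-- stated objective: alternative
-- what changed: A XORs per-row range boundaries (row start-1 and row end prefix-XORs); B instead XORs the whole length*length rectangle in one closed-form term and cancels the XOR of the removed row tails, a complement decomposition whose loop iterates over tail boundaries rather than row boundaries.
import Mathlib
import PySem

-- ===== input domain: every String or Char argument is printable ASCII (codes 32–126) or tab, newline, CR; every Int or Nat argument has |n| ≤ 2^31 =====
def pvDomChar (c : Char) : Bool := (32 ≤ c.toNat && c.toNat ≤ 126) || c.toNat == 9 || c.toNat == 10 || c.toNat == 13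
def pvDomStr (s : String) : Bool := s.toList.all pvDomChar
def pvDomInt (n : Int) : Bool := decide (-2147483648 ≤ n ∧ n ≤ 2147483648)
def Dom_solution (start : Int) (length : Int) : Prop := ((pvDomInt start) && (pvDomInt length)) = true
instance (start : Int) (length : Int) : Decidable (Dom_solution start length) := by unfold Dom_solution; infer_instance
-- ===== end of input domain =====

-- B replaces A's per-row boundary loop by "XOR of the whole rectangle (one closed-form term) XOR the
-- XOR of the removed row tails"; a genuinely different decomposition of the same value (objective: alternative).

-- ===== PORT A =====
-- A's inner helper xortill, branch order as in A
def xortillA (n : Int) : Int :=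
  if PySem.Int.mod n 4 = 1 then 1
  else if PySem.Int.mod n 4 = 2 then n + 1
  else if PySem.Int.mod n 4 = 3 then 0
  else n

def solution (start : Int) (length : Int) : Int :=
  (PySem.List.pyRange 0 length 1).foldl
    (fun answer j =>
      let a := xortillA (start + (j * length) - 1)
      let b := xortillA (start + ((j + 1) * length) - (j + 1))
      PySem.Int.bxor answer (PySem.Int.bxor a b)) 0

-- ===== PORT B =====
-- B's xortill: table on n % 4 checked in order 0,1,2, else 3
def xortillB (n : Int) : Int :=
  let r := PySem.Int.mod n 4
  if r = 0 then n
  else if r = 1 then 1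
  else if r = 2 then n + 1
  else 0

def solution_alt (start : Int) (length : Int) : Int :=
  if length ≤ 0 then 0
  else
    let full := PySem.Int.bxor (xortillB (start + length * length - 1)) (xortillB (start - 1))
    let tails := (PySem.List.pyRange 0 length 1).foldl
      (fun t j =>
        let top := start + (j + 1) * length - 1
        let kept := start + (j + 1) * length - (j + 1)
        PySem.Int.bxor t (PySem.Int.bxor (xortillB top) (xortillB kept))) 0
    PySem.Int.bxor full tails

-- ===== PRECONDITION & SPEC =====
def Spec_solution (start : Int) (length : Int) (out : Int) : Prop := out = solution_alt start length
instance (start : Int) (length : Int) (out : Int) : Decidable (Spec_solution start length out) := by unfold Spec_solution; infer_instance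

-- ===== CLAIM (what is proved, stated in full; the proofs are below) =====
def Claim_equal_solution : Prop := ∀ (start : Int) (length : Int), Dom_solution start length → Spec_solution start length (solution start length)

-- ===== LEMMAS AND PROOFS =====

theorem bxor_ofNat_ofNat (m n : Nat) :
    PySem.Int.bxor (Int.ofNat m) (Int.ofNat n) = Int.ofNat (m ^^^ n) := by
  rw [PySem.Int.bxor.eq_1]; simp
theorem bxor_ofNat_negSucc (m n : Nat) :
    PySem.Int.bxor (Int.ofNat m) (Int.negSucc n) = Int.negSucc (m ^^^ n) := by
  rw [PySem.Int.bxor.eq_1]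
  have h1 : ¬ (0 : Int) ≤ Int.negSucc n := by rw [Int.negSucc_eq]; omega
  have h2 : (-(Int.negSucc n) - 1).toNat = n := by rw [Int.negSucc_eq]; omega
  have h3 : (Int.ofNat m).toNat = m := rfl
  simp only [if_pos (by rw [Int.ofNat_eq_natCast]; exact Int.natCast_nonneg m : (0:Int) ≤ Int.ofNat m), if_neg h1, h2, h3]
  rw [Int.negSucc_eq]; omega
theorem bxor_negSucc_ofNat (m n : Nat) :
    PySem.Int.bxor (Int.negSucc m) (Int.ofNat n) = Int.negSucc (m ^^^ n) := by
  rw [PySem.Int.bxor_comm, bxor_ofNat_negSucc, Nat.xor_comm]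
theorem bxor_negSucc_negSucc (m n : Nat) :
    PySem.Int.bxor (Int.negSucc m) (Int.negSucc n) = Int.ofNat (m ^^^ n) := by
  rw [PySem.Int.bxor.eq_1]
  have h1 : ¬ (0 : Int) ≤ Int.negSucc m := by rw [Int.negSucc_eq]; omega
  have h2 : ¬ (0 : Int) ≤ Int.negSucc n := by rw [Int.negSucc_eq]; omega
  have h3 : (-(Int.negSucc m) - 1).toNat = m := by rw [Int.negSucc_eq]; omega
  have h4 : (-(Int.negSucc n) - 1).toNat = n := by rw [Int.negSucc_eq]; omega
  simp only [if_neg h1, if_neg h2, h3, h4, Int.ofNat_eq_natCast]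
theorem bxor_assoc (a b c : Int) :
    PySem.Int.bxor (PySem.Int.bxor a b) c = PySem.Int.bxor a (PySem.Int.bxor b c) := by
  cases a <;> cases b <;> cases c <;>
    simp only [bxor_ofNat_ofNat, bxor_ofNat_negSucc, bxor_negSucc_ofNat, bxor_negSucc_negSucc,
      Nat.xor_assoc]

theorem xortill_eq (n : Int) : xortillB n = xortillA n := by
  unfold xortillA xortillB
  have h0 : 0 ≤ PySem.Int.mod n 4 := PySem.Int.mod_nonneg n (by norm_num)
  have h1 : PySem.Int.mod n 4 < 4 := PySem.Int.mod_lt n (by norm_num)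
  interval_cases h : PySem.Int.mod n 4 <;> simp

theorem zero_bxor (a : Int) : PySem.Int.bxor 0 a = a := by
  rw [PySem.Int.bxor_comm, PySem.Int.bxor_zero]

theorem bxor_left_comm (a b c : Int) :
    PySem.Int.bxor a (PySem.Int.bxor b c) = PySem.Int.bxor b (PySem.Int.bxor a c) := by
  rw [← bxor_assoc, PySem.Int.bxor_comm a b, bxor_assoc]

theorem bxor_cancel_left (a b : Int) : PySem.Int.bxor a (PySem.Int.bxor a b) = b := by
  rw [← bxor_assoc, PySem.Int.bxor_self, zero_bxor]

theorem xor5 (p q b p' e : Int) :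
    PySem.Int.bxor (PySem.Int.bxor (PySem.Int.bxor p q) b) (PySem.Int.bxor p e)
      = PySem.Int.bxor (PySem.Int.bxor p' q) (PySem.Int.bxor b (PySem.Int.bxor p' e)) := by
  simp only [bxor_assoc]
  rw [bxor_left_comm p q, bxor_left_comm p b, bxor_cancel_left,
      bxor_left_comm p' q, bxor_left_comm p' b, bxor_cancel_left]

theorem foldl_xor_acc (g : Int → Int) (l : List Int) (a : Int) :
    l.foldl (fun t j => PySem.Int.bxor t (g j)) a
      = PySem.Int.bxor a (l.foldl (fun t j => PySem.Int.bxor t (g j)) 0) := by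
  induction l generalizing a with
  | nil => simp [PySem.Int.bxor_zero]
  | cons x xs ih =>
    simp only [List.foldl_cons]
    rw [ih (PySem.Int.bxor a (g x)), ih (PySem.Int.bxor 0 (g x)), zero_bxor, bxor_assoc]

theorem key (s L : Int) (n : Nat) :
    (PySem.List.pyRange 0 (n : Int) 1).foldl
      (fun answer j => PySem.Int.bxor answer
        (PySem.Int.bxor (xortillA (s + (j * L) - 1)) (xortillA (s + ((j + 1) * L) - (j + 1))))) 0
    = PySem.Int.bxor
        (PySem.Int.bxor (xortillA (s + (n : Int) * L - 1)) (xortillA (s - 1)))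
        ((PySem.List.pyRange 0 (n : Int) 1).foldl
          (fun t j => PySem.Int.bxor t
            (PySem.Int.bxor (xortillA (s + (j + 1) * L - 1)) (xortillA (s + (j + 1) * L - (j + 1))))) 0) := by
  induction n with
  | zero =>
    simp only [Nat.cast_zero, PySem.List.pyRange_one_eq_nil (by norm_num : (0:Int) ≤ 0),
      List.foldl_nil, Int.zero_mul, Int.add_zero]
    rw [PySem.Int.bxor_self, zero_bxor]
  | succ m ih =>
    have hr : PySem.List.pyRange 0 (((m + 1 : Nat) : Int)) 1
        = PySem.List.pyRange 0 (m : Int) 1 ++ [(m : Int)] := by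
      push_cast
      exact PySem.List.pyRange_one_succ_right (by positivity)
    rw [hr, List.foldl_append, List.foldl_append]
    simp only [List.foldl_cons, List.foldl_nil]
    rw [foldl_xor_acc, foldl_xor_acc]
    rw [ih, zero_bxor, zero_bxor]
    push_cast
    exact xor5 _ _ _ _ _

-- ===== VERDICT (by name: the statement is the Claim_ definition above) =====
theorem solution_spec : Claim_equal_solution := by
  intro start length _
  unfold Spec_solution solution solution_alt
  by_cases h : length ≤ 0
  · rw [if_pos h, PySem.List.pyRange_one_eq_nil h, List.foldl_nil]
  · rw [if_neg h]
    simp only [xortill_eq]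
    have hL : length = ((length.toNat : Nat) : Int) := by omega
    rw [hL]
    have hk := key start length length.toNat
    rw [← hL] at hk
    rw [← hL]
    exact hk
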